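-- pv_equiv track=rewrite | github.com/VyUng0711/competitive-programming-solutions | UVa/guess_data_structure.py | guess_data_structure
-- ===== SOURCE A (Python) =====
-- import queue
--
-- def guess_data_structure(queries):
--   s = []
--   q = queue.Queue()
--   h = queue.PriorityQueue()
--   is_stack = True
--   is_queue = True
--   is_priority_queue = True
--   for query in queries:
--     if query[0] == 1:
--       if is_stack:
--         s.append(query[1])
--       if is_queue:
--         q.put(query[1])
--       if is_priority_queue:
--         h.put(-query[1])
--     else:
--       if is_stack:
--         if len(s) == 0 or query[1] != s[-1]:
--           is_stack = False
--         else: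
--           s.pop()
--       if is_queue:
--         if q.empty() or query[1] != q.queue[0]:
--           is_queue = False
--         else:
--           q.get()
--       if is_priority_queue:
--         if h.empty() or -query[1] != h.queue[0]:
--           is_priority_queue = False
--         else:
--           h.get()
--
--   if is_stack and not is_queue and not is_priority_queue:
--     return ("stack")
--   if is_queue and not is_stack and not is_priority_queue:
--     return ("queue")
--   if is_priority_queue and not is_stack and not is_queue:
--     return ("priority queue")
--   if not is_stack and not is_queue and not is_priority_queue:
--     return ("impossible")
--   else:
--     return ("not sure")
-- ===== SOURCE B (Python) =====
-- def _valid_stack(queries):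
--     s = []
--     for query in queries:
--         if query[0] == 1:
--             s.append(query[1])
--         else:
--             if not s or query[1] != s[-1]:
--                 return False
--             s.pop()
--     return True
--
--
-- def _valid_queue(queries):
--     buf = []
--     head = 0
--     for query in queries:
--         if query[0] == 1:
--             buf.append(query[1])
--         else:
--             if head == len(buf) or query[1] != buf[head]:
--                 return False
--             head += 1
--     return True
--
--
-- def _valid_pq(queries):
--     lst = []
--     for query in queries:
--         if query[0] == 1:
--             lst.append(query[1])
--         else:
--             if not lst or query[1] != max(lst):
--                 return False
--             lst.remove(query[1])
--     return True
--
--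
-- def guess_data_structure(queries):
--     is_stack = _valid_stack(queries)
--     is_queue = _valid_queue(queries)
--     is_priority_queue = _valid_pq(queries)
--     if is_stack and not is_queue and not is_priority_queue:
--         return ("stack")
--     if is_queue and not is_stack and not is_priority_queue:
--         return ("queue")
--     if is_priority_queue and not is_stack and not is_queue:
--         return ("priority queue")
--     if not is_stack and not is_queue and not is_priority_queue:
--         return ("impossible")
--     else:
--         return ("not sure")
-- ===== Notes on version B (the rewrite author's own statement) =====
-- stated objective: simpler
-- what changed: A's single interleaved pass maintaining three live structures plus three flags is replaced by three independent single-purpose passes (stack list, queue as array+head index, priority queue as plain list with max/remove) each returning False at the first mismatch, combined by the same final if-ladder.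
import Mathlib
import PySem

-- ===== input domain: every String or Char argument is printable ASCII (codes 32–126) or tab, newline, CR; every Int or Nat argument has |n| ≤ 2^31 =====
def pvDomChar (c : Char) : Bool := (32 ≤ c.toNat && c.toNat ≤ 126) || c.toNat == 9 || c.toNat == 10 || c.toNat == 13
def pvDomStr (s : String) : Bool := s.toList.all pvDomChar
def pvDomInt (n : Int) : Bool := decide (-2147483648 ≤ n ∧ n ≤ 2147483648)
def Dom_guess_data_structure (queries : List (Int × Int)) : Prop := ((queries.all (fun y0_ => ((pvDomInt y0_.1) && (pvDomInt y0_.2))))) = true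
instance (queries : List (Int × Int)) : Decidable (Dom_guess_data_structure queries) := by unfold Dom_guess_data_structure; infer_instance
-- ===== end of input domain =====

-- B replaces A's single interleaved pass (three live structures + three flags) by three
-- independent single-purpose passes with early exit; objective: simpler decomposition (no speed claim).

-- ===== PORT A =====
-- queue.Queue is modeled as a List Int (put = append, .queue[0] = head, get = drop the head);
-- queue.PriorityQueue as a sorted List Int (put = ordered insert, .queue[0] = head = the heap minimum,
-- get = drop the head): exact for the only operations A performs (empty(), .queue[0], put, get).
def stepS (v : Int) (s : List Int) (bs : Bool) : List Int × Bool :=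
  if bs then
    (if s.length = 0 then (s, false)
     else if PySem.List.pyGet? s (-1) ≠ some v then (s, false)
     else (s.dropLast, true))
  else (s, bs)

def stepQ (v : Int) (q : List Int) (bq : Bool) : List Int × Bool :=
  if bq then
    (if q = [] then (q, false)
     else if q.head? ≠ some v then (q, false)
     else (q.tail, true))
  else (q, bq)

def stepH (v : Int) (h : List Int) (bp : Bool) : List Int × Bool :=
  if bp then
    (if h = [] then (h, false)
     else if h.head? ≠ some (-v) then (h, false)
     else (h.tail, true))
  else (h, bp)

def loopA : List (Int × Int) → List Int → List Int → List Int → Bool → Bool → Bool → Bool × Bool × Bool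
  | [], _, _, _, bs, bq, bp => (bs, bq, bp)
  | query :: rest, s, q, h, bs, bq, bp =>
    if query.1 = 1 then
      loopA rest (if bs then s ++ [query.2] else s)
                 (if bq then q ++ [query.2] else q)
                 (if bp then List.orderedInsert (· ≤ ·) (-query.2) h else h) bs bq bp
    else
      loopA rest (stepS query.2 s bs).1 (stepQ query.2 q bq).1 (stepH query.2 h bp).1
                 (stepS query.2 s bs).2 (stepQ query.2 q bq).2 (stepH query.2 h bp).2

def guess_data_structure (queries : List (Int × Int)) : String :=
  let r := loopA queries [] [] [] true true true
  let is_stack := r.1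
  let is_queue := r.2.1
  let is_priority_queue := r.2.2
  if is_stack && !is_queue && !is_priority_queue then "stack"
  else if is_queue && !is_stack && !is_priority_queue then "queue"
  else if is_priority_queue && !is_stack && !is_queue then "priority queue"
  else if !is_stack && !is_queue && !is_priority_queue then "impossible"
  else "not sure"

-- ===== PORT B =====
def stackGo : List (Int × Int) → List Int → Bool
  | [], _ => true
  | query :: rest, s =>
    if query.1 = 1 then stackGo rest (s ++ [query.2])
    else if s = [] then false
    else if PySem.List.pyGet? s (-1) ≠ some query.2 then false
    else stackGo rest s.dropLast

def queueGo : List (Int × Int) → List Int → Nat → Bool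
  | [], _, _ => true
  | query :: rest, buf, head =>
    if query.1 = 1 then queueGo rest (buf ++ [query.2]) head
    else if head = buf.length then false
    else if buf[head]? ≠ some query.2 then false
    else queueGo rest buf (head + 1)

-- `not lst or query[1] != max(lst)` is one test on max?: max? [] = none covers the `not lst` arm
def pqGo : List (Int × Int) → List Int → Bool
  | [], _ => true
  | query :: rest, lst =>
    if query.1 = 1 then pqGo rest (lst ++ [query.2])
    else if PySem.List.max? lst (fun x => x) ≠ some query.2 then false
    else pqGo rest ((PySem.List.remove? lst query.2).getD lst)

def guess_data_structure_alt (queries : List (Int × Int)) : String :=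
  let is_stack := stackGo queries []
  let is_queue := queueGo queries [] 0
  let is_priority_queue := pqGo queries []
  if is_stack && !is_queue && !is_priority_queue then "stack"
  else if is_queue && !is_stack && !is_priority_queue then "queue"
  else if is_priority_queue && !is_stack && !is_queue then "priority queue"
  else if !is_stack && !is_queue && !is_priority_queue then "impossible"
  else "not sure"

-- ===== PRECONDITION & SPEC =====
def Spec_guess_data_structure (queries : List (Int × Int)) (out : String) : Prop := out = guess_data_structure_alt queries
instance (queries : List (Int × Int)) (out : String) : Decidable (Spec_guess_data_structure queries out) := by unfold Spec_guess_data_structure; infer_instance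

-- ===== CLAIM (what is proved, stated in full; the proofs are below) =====
def Claim_equal_guess_data_structure : Prop := ∀ (queries : List (Int × Int)), Dom_guess_data_structure queries → Spec_guess_data_structure queries (guess_data_structure queries)

-- ===== LEMMAS AND PROOFS =====

lemma loopA_stack (qs : List (Int × Int)) : ∀ (s q h : List Int) (bs bq bp : Bool),
    (loopA qs s q h bs bq bp).1 = if bs then stackGo qs s else false := by
  induction qs with
  | nil => intro s q h bs bq bp; cases bs <;> simp [loopA, stackGo]
  | cons query rest ih =>
    intro s q h bs bq bp
    by_cases h1 : query.1 = 1
    · cases bs <;>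
        simp only [loopA, h1, reduceIte, Bool.false_eq_true, if_false, stackGo]
      · rw [ih]; simp
      · rw [ih]; simp
    · cases bs <;>
        simp only [loopA, h1, reduceIte, Bool.false_eq_true, if_false, stepS, stackGo]
      · rw [ih]; simp
      · rw [ih]
        split_ifs with e1 e2 <;> simp_all [List.length_eq_zero_iff]

lemma loopA_queue (qs : List (Int × Int)) :
    ∀ (s q h buf : List Int) (head : Nat) (bs bq bp : Bool),
    q = buf.drop head → head ≤ buf.length →
    (loopA qs s q h bs bq bp).2.1 = if bq then queueGo qs buf head else false := by
  induction qs with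
  | nil => intro s q h buf head bs bq bp _ _; cases bq <;> simp [loopA, queueGo]
  | cons query rest ih =>
    intro s q h buf head bs bq bp hq hle
    by_cases h1 : query.1 = 1
    · cases bq with
      | false =>
        simp only [loopA, h1, reduceIte, Bool.false_eq_true, if_false]
        rw [ih _ _ _ buf head _ _ _ hq hle]; simp
      | true =>
        simp only [loopA, h1, reduceIte, queueGo]
        rw [ih _ _ _ (buf ++ [query.2]) head _ _ _
            (by simp [hq, List.drop_append_of_le_length hle])
            (by simpa using Nat.le_succ_of_le hle)]
        simp
    · cases bq with
      | false =>
        simp only [loopA, h1, reduceIte, Bool.false_eq_true, if_false, stepQ]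
        rw [ih _ _ _ buf head _ _ _ hq hle]; simp
      | true =>
        simp only [loopA, h1, reduceIte, Bool.false_eq_true, if_false, stepQ, queueGo]
        by_cases he : head = buf.length
        · have hnil : q = [] := by rw [hq, he, List.drop_length]
          rw [if_pos hnil, if_pos he]
          rw [ih _ _ _ buf head _ _ _ hq hle]
          simp
        · have hlt : head < buf.length := lt_of_le_of_ne hle he
          have hne : q ≠ [] := by rw [hq]; simp [List.drop_eq_nil_iff]; omega
          have hhd : q.head? = buf[head]? := by rw [hq, List.head?_drop]
          simp only [hne, he, hhd, reduceIte, if_false]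
          by_cases hv : buf[head]? ≠ some query.2
          · rw [if_pos hv]
            rw [ih _ _ _ buf head _ _ _ hq hle]
            simp
            exact fun hc => absurd hc hv
          · rw [if_neg hv]
            rw [ih _ _ _ buf (head + 1) _ _ _ (by rw [hq, List.tail_drop]) hlt]
            simp
            exact fun _ => not_not.mp hv

lemma loopA_pq (qs : List (Int × Int)) :
    ∀ (s q h lst : List Int) (bs bq bp : Bool),
    h.Pairwise (· ≤ ·) → h.Perm (lst.map (fun x => -x)) →
    (loopA qs s q h bs bq bp).2.2 = if bp then pqGo qs lst else false := by
  induction qs with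
  | nil => intro s q h lst bs bq bp _ _; cases bp <;> simp [loopA, pqGo]
  | cons query rest ih =>
    intro s q h lst bs bq bp hs hp
    by_cases h1 : query.1 = 1
    · cases bp with
      | false =>
        simp only [loopA, h1, reduceIte, Bool.false_eq_true, if_false]
        rw [ih _ _ h lst _ _ _ hs hp]; simp
      | true =>
        simp only [loopA, h1, reduceIte, pqGo]
        rw [ih _ _ _ (lst ++ [query.2]) _ _ _
            (List.Pairwise.orderedInsert _ _ hs)
            (((List.perm_orderedInsert _ _ _).trans (hp.cons _)).trans
              (by simpa using (List.perm_append_singleton (-query.2) (lst.map (fun x => -x))).symm))]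
        simp
    · cases bp with
      | false =>
        simp only [loopA, h1, reduceIte, Bool.false_eq_true, if_false, stepH]
        rw [ih _ _ h lst _ _ _ hs hp]; simp
      | true =>
        simp only [loopA, h1, reduceIte, Bool.false_eq_true, if_false, stepH, pqGo]
        cases h with
        | nil =>
          have hl : lst = [] := by
            have := hp.length_eq; simpa using this.symm
          rw [if_pos rfl, if_pos (show PySem.List.max? lst (fun x => x) ≠ some query.2 by
                rw [hl]; simp [PySem.List.max?])]
          rw [ih _ _ _ [] _ _ _ (by simp) (by simp)]
          simp
        | cons a t =>
          -- a is the head = minimum of the sorted heap list; max(lst) = -a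
          have hmem : -a ∈ lst := by
            have : a ∈ lst.map (fun x => -x) := hp.mem_iff.mp (List.mem_cons_self ..)
            obtain ⟨x, hx, he⟩ := List.mem_map.mp this
            simpa [← he] using hx
          obtain ⟨m, hm⟩ : ∃ m, PySem.List.max? lst (fun x => x) = some m := by
            cases hmx : PySem.List.max? lst (fun x => x) with
            | none => exact absurd ((PySem.List.max?_eq_none_iff _ _).mp hmx ▸ hmem) (by simp)
            | some m => exact ⟨m, rfl⟩
          have hmmem : m ∈ lst := PySem.List.max?_mem hm
          have hmax : ∀ y ∈ lst, y ≤ m := PySem.List.max?_isMax hm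
          have hma : m = -a := by
            have h1' : -a ≤ m := hmax _ hmem
            have h2' : -m ∈ a :: t := hp.mem_iff.mpr (List.mem_map.mpr ⟨m, hmmem, rfl⟩)
            have h3' : a ≤ -m := by
              rcases List.mem_cons.mp h2' with h2'' | h2''
              · omega
              · exact (List.pairwise_cons.mp hs).1 _ h2''
            omega
          have hcons_ne : (a :: t : List Int) ≠ [] := by simp
          rw [if_neg hcons_ne, List.head?_cons, hm]
          by_cases hv : a = -query.2
          · have hvm : m = query.2 := by omega
            rw [if_neg (show ¬(some a ≠ some (-query.2)) by simp [hv]),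
                if_neg (show ¬(some m ≠ some query.2) by simp [hvm])]
            simp only [List.tail_cons]
            have hrm : PySem.List.remove? lst query.2 = some (lst.erase query.2) :=
              PySem.List.remove?_eq_some_erase lst query.2 (by rw [← hvm]; exact hmmem)
            have hperm : t.Perm ((lst.erase query.2).map (fun x => -x)) := by
              have hme : (lst.erase query.2).map (fun x => -x)
                  = (lst.map (fun x => -x)).erase (-query.2) :=
                List.map_erase (fun x y hxy => by omega) ..
              rw [hme, ← hv]
              have := hp.erase a
              simpa using this
            rw [ih _ _ _ (lst.erase query.2) _ _ _ (List.pairwise_cons.mp hs).2 hperm]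
            simp [hrm]
          · have hmne : m ≠ query.2 := by omega
            rw [if_pos (show some a ≠ some (-query.2) by simpa using hv),
                if_pos (show some m ≠ some query.2 by simpa using hmne)]
            rw [ih _ _ (a :: t) lst _ _ _ hs hp]
            simp

lemma ladder_eq (queries : List (Int × Int)) :
    guess_data_structure queries = guess_data_structure_alt queries := by
  have h1 : (loopA queries [] [] [] true true true).1 = stackGo queries [] := by
    rw [loopA_stack]; simp
  have h2 : (loopA queries [] [] [] true true true).2.1 = queueGo queries [] 0 := by
    rw [loopA_queue queries [] [] [] [] 0 true true true rfl (by simp)]; simp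
  have h3 : (loopA queries [] [] [] true true true).2.2 = pqGo queries [] := by
    rw [loopA_pq queries [] [] [] [] true true true (by simp) (by simp)]; simp
  simp only [guess_data_structure, guess_data_structure_alt, h1, h2, h3]

-- ===== VERDICT (by name: the statement is the Claim_ definition above) =====
theorem guess_data_structure_spec : Claim_equal_guess_data_structure := by
  intro queries _
  unfold Spec_guess_data_structure
  exact ladder_eq queries
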